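-- pv_equiv track=rewrite | github.com/tnoinkwms/gptalter | FastGEN.py | identify_code_blocks_by_newlines
-- ===== SOURCE A (Python) =====
-- def identify_code_blocks_by_newlines(content):
--     blocks = []
--     code_block = []
--     in_code_block = False
--
--     for line in content:
--         stripped_line = line.strip()
--         if stripped_line:
--             if stripped_line.startswith("```"):
--                 line = "#"+ line
--             if stripped_line.startswith("while"):
--                 line = "#"+ line
--             code_block.append(line)
--             in_code_block = True
--         elif in_code_block:
--             if line.startswith("```"):
--                 line = "#"+ line
--             if line.startswith("while"):
--                 line = "#"+ line
--             code_block.append(line)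
--         else:  # end of a code block
--             if code_block:
--                 blocks.append("".join(code_block))
--                 code_block = []
--                 in_code_block = False
--     if code_block:
--         blocks.append("".join(code_block))
--     return blocks
-- ===== SOURCE B (Python) =====
-- def identify_code_blocks_by_newlines(content):
--     # A never resets in_code_block once set, so it emits at most one block:
--     # everything from the first non-blank line on, joined, with '#' prepended
--     # to lines whose stripped form starts with "```" or "while".
--     lines = list(content)
--     i = 0
--     while i < len(lines) and not lines[i].strip():
--         i += 1
--     if i == len(lines):
--         return []
--     return ["".join(
--         "#" + line if line.strip().startswith(("```", "while")) else line
--         for line in lines[i:]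
--     )]
-- ===== Notes on version B (the rewrite author's own statement) =====
-- stated objective: simpler
-- what changed: B replaces A's three-state block accumulator (blocks/code_block/in_code_block) with the observation that A can only ever produce one block: skip leading blank lines, then map-and-join the rest in a single comprehension.
import Mathlib
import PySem

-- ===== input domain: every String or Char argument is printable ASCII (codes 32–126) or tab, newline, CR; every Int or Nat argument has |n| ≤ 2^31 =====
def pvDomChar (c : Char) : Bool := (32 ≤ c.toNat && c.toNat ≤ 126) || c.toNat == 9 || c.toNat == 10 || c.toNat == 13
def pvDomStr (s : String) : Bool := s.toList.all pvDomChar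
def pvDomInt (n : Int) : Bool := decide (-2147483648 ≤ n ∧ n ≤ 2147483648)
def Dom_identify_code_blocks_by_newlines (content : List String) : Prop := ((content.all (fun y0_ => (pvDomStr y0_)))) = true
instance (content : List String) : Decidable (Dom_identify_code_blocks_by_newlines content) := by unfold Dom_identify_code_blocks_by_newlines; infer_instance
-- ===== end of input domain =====

-- B is simpler: A's three-state accumulator can only ever emit one block, so B skips
-- leading blank lines and joins the transformed remainder; return values proved equal.

-- ===== PORT A =====
-- one iteration of A's for-loop, state = (blocks, code_block, in_code_block)
def pvAStep (st : List String × List String × Bool) (line : String) :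
    List String × List String × Bool :=
  let stripped_line := PySem.Str.strip line
  if stripped_line ≠ "" then
    let line1 := if PySem.Str.startswith stripped_line "```" then "#" ++ line else line
    let line2 := if PySem.Str.startswith stripped_line "while" then "#" ++ line1 else line1
    (st.1, st.2.1 ++ [line2], true)
  else if st.2.2 then
    let line1 := if PySem.Str.startswith line "```" then "#" ++ line else line
    let line2 := if PySem.Str.startswith line1 "while" then "#" ++ line1 else line1
    (st.1, st.2.1 ++ [line2], st.2.2)
  else
    if st.2.1 ≠ [] then (st.1 ++ [PySem.Str.join "" st.2.1], [], false)
    else st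

def identify_code_blocks_by_newlines (content : List String) : List String :=
  let fin := content.foldl pvAStep ([], [], false)
  if fin.2.1 ≠ [] then fin.1 ++ [PySem.Str.join "" fin.2.1] else fin.1

-- ===== PORT B =====
-- the comprehension body: '#' + line if line.strip().startswith(("```", "while")) else line
def pvBLine (line : String) : String :=
  let s := PySem.Str.strip line
  if PySem.Str.startswith s "```" || PySem.Str.startswith s "while" then "#" ++ line
  else line

-- the initial while-loop of Source B: advance past leading blank lines
def pvSkipBlanks : List String → List String
  | [] => []
  | l :: rest => if PySem.Str.strip l = "" then pvSkipBlanks rest else l :: rest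

def identify_code_blocks_by_newlines_alt (content : List String) : List String :=
  match pvSkipBlanks content with
  | [] => []
  | lines => [PySem.Str.join "" (lines.map pvBLine)]

-- ===== PRECONDITION & SPEC =====
def Spec_identify_code_blocks_by_newlines (content : List String) (out : List String) : Prop := out = identify_code_blocks_by_newlines_alt content
instance (content : List String) (out : List String) : Decidable (Spec_identify_code_blocks_by_newlines content out) := by unfold Spec_identify_code_blocks_by_newlines; infer_instance

-- ===== CLAIM (what is proved, stated in full; the proofs are below) =====
def Claim_equal_identify_code_blocks_by_newlines : Prop := ∀ (content : List String), Dom_identify_code_blocks_by_newlines content → Spec_identify_code_blocks_by_newlines content (identify_code_blocks_by_newlines content)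

-- ===== LEMMAS AND PROOFS =====

-- a line whose strip() is empty consists of whitespace only
theorem pv_strip_nil_all_space (cs : List Char) (h : PySem.Chars.strip cs = []) :
    ∀ c ∈ cs, PySem.Chars.isspace c = true := by
  simp only [PySem.Chars.strip, PySem.Chars.rstrip, PySem.Chars.lstrip,
    List.reverse_eq_nil_iff, List.dropWhile_eq_nil_iff, List.mem_reverse] at h
  intro c hc
  rcases (List.takeWhile_append_dropWhile (p := PySem.Chars.isspace) (l := cs)) ▸ hc |> List.mem_append.mp with h1 | h2
  · exact List.mem_takeWhile_imp h1
  · exact h c h2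

-- a whitespace-only line starts with neither "```" nor "while"
theorem pv_blank_startswith (line : String) (h : PySem.Str.strip line = "") :
    PySem.Str.startswith line "```" = false ∧ PySem.Str.startswith line "while" = false := by
  have hall : ∀ c ∈ line.toList, PySem.Chars.isspace c = true := by
    apply pv_strip_nil_all_space
    have := congrArg String.toList h
    simpa using this
  constructor <;>
  · rw [← Bool.not_eq_true, PySem.Str.startswith_eq, PySem.Chars.startswith_iff]
    intro hp
    rcases hp with ⟨t, ht⟩
    cases hl : line.toList with
    | nil => rw [hl] at ht; simp at ht
    | cons c rest =>
      rw [hl] at ht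
      have hc : c ∈ line.toList := by rw [hl]; exact List.mem_cons_self
      have := hall c hc
      simp at ht
      rw [← ht.1] at this
      simp [PySem.Chars.isspace] at this

-- a string cannot start with both "```" and "while"
theorem pv_not_both (s : String) (h : PySem.Str.startswith s "```" = true) :
    PySem.Str.startswith s "while" = false := by
  rw [PySem.Str.startswith_eq, PySem.Chars.startswith_iff] at h
  rw [← Bool.not_eq_true, PySem.Str.startswith_eq, PySem.Chars.startswith_iff]
  rcases h with ⟨t, ht⟩
  intro hw
  rcases hw with ⟨u, hu⟩
  rw [← ht] at hu
  simp at hu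

-- on a non-blank line A's two sequential rewrites compute pvBLine
theorem pv_step_nonblank (st : List String × List String × Bool) (line : String)
    (h : PySem.Str.strip line ≠ "") :
    pvAStep st line = (st.1, st.2.1 ++ [pvBLine line], true) := by
  unfold pvAStep pvBLine
  simp only [h, if_pos, ne_eq, not_false_iff]
  by_cases h1 : PySem.Str.startswith (PySem.Str.strip line) "```" = true
  · have h2 := pv_not_both _ h1
    have h1' : PySem.Chars.startswith (PySem.Chars.strip line.toList) ['`','`','`'] = true := by
      simpa using h1
    have h2' : PySem.Chars.startswith (PySem.Chars.strip line.toList) ['w','h','i','l','e'] = false := by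
      simpa using h2
    simp [h1', h2']
  · simp only [Bool.not_eq_true] at h1
    have h1' : PySem.Chars.startswith (PySem.Chars.strip line.toList) ['`','`','`'] = false := by
      simpa using h1
    by_cases h2 : PySem.Str.startswith (PySem.Str.strip line) "while" = true
    · have h2' : PySem.Chars.startswith (PySem.Chars.strip line.toList) ['w','h','i','l','e'] = true := by
        simpa using h2
      simp [h1', h2']
    · simp only [Bool.not_eq_true] at h2
      have h2' : PySem.Chars.startswith (PySem.Chars.strip line.toList) ['w','h','i','l','e'] = false := by
        simpa using h2
      simp [h1', h2']

-- on a blank line inside a block A appends the line unchanged, and pvBLine is the identity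
theorem pv_step_blank (st : List String × List String × Bool) (line : String)
    (h : PySem.Str.strip line = "") (hb : st.2.2 = true) :
    pvAStep st line = (st.1, st.2.1 ++ [pvBLine line], st.2.2) := by
  obtain ⟨h1, h2⟩ := pv_blank_startswith line h
  have h1' : PySem.Chars.startswith line.toList ['`','`','`'] = false := by simpa using h1
  have h2' : PySem.Chars.startswith line.toList ['w','h','i','l','e'] = false := by simpa using h2
  unfold pvAStep pvBLine
  simp [h, hb, h1', h2']
  rintro (hc | hc) <;> exact absurd hc (by decide)
-- in-block invariant: once in_code_block is true with no emitted blocks, the loop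
-- just appends pvBLine of every remaining line
theorem pv_inblock (rest : List String) (blocks cb : List String) :
    rest.foldl pvAStep (blocks, cb, true) = (blocks, cb ++ rest.map pvBLine, true) := by
  induction rest generalizing cb with
  | nil => simp
  | cons l t ih =>
    by_cases h : PySem.Str.strip l = ""
    · rw [List.foldl_cons, pv_step_blank (blocks, cb, true) l h rfl, ih]
      simp
    · rw [List.foldl_cons, pv_step_nonblank (blocks, cb, true) l h, ih]
      simp

-- the leading blank lines leave A's initial state unchanged
theorem pv_skip (content : List String) :
    content.foldl pvAStep ([], [], false) = (pvSkipBlanks content).foldl pvAStep ([], [], false) := by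
  induction content with
  | nil => rfl
  | cons l t ih =>
    by_cases h : PySem.Str.strip l = ""
    · have hstep : pvAStep ([], [], false) l = ([], [], false) := by
        unfold pvAStep; simp [h]
      rw [List.foldl_cons, hstep, ih]
      simp [pvSkipBlanks, h]
    · simp [pvSkipBlanks, h]

-- pvSkipBlanks never returns a list headed by a blank line
theorem pv_skipBlanks_head (content : List String) (l : String) (rest : List String)
    (hs : pvSkipBlanks content = l :: rest) : PySem.Str.strip l ≠ "" := by
  induction content with
  | nil => simp [pvSkipBlanks] at hs
  | cons a t ih =>
    by_cases h : PySem.Str.strip a = ""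
    · exact ih (by simpa [pvSkipBlanks, h] using hs)
    · simp only [pvSkipBlanks, h, if_false] at hs
      injection hs with hl' _
      rw [← hl']
      exact h

-- ===== VERDICT (by name: the statement is the Claim_ definition above) =====
theorem identify_code_blocks_by_newlines_spec : Claim_equal_identify_code_blocks_by_newlines := by
  intro content _
  unfold Spec_identify_code_blocks_by_newlines identify_code_blocks_by_newlines
    identify_code_blocks_by_newlines_alt
  rw [pv_skip]
  cases hs : pvSkipBlanks content with
  | nil => simp
  | cons l rest =>
    have hl := pv_skipBlanks_head content l rest hs
    rw [List.foldl_cons, pv_step_nonblank ([], [], false) l hl, pv_inblock]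
    simp
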